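-- pv_equiv track=rewrite | github.com/yaohongfenglove/easy_clip | main.py | get_subtitles_list
-- ===== SOURCE A (Python) =====
-- import itertools
-- from typing import List, Dict
--
-- def get_subtitles_list(subtitles: List):
--     """
--     获取字幕的组合列表
--     首段和尾段固定，中间的段进行全排列
--     :param subtitles: 原始字幕
--     :return:
--     """
--     first_paragraph = subtitles[0]
--     middle_paragraphs = subtitles[1:-1]
--     last_paragraph = subtitles[-1]
--
--     permutations = itertools.permutations(middle_paragraphs, len(middle_paragraphs))
--     permutations = [list(p) for p in permutations]
--
--     text_list = list()
--     for permutation in permutations: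
--         text_list.append([first_paragraph] + permutation + [last_paragraph])
--
--     return text_list
-- ===== SOURCE B (Python) =====
-- from typing import List, Dict
--
--
-- def get_subtitles_list(subtitles: List):
--     first_paragraph = subtitles[0]
--     last_paragraph = subtitles[-1]
--     middle_paragraphs = subtitles[1:-1]
--
--     text_list = []
--
--     def extend(remaining, partial):
--         if not remaining:
--             text_list.append([first_paragraph] + partial + [last_paragraph])
--             return
--         for i in range(len(remaining)):
--             extend(remaining[:i] + remaining[i + 1:], partial + [remaining[i]])
--
--     extend(middle_paragraphs, [])
--     return text_list
-- ===== Notes on version B (the rewrite author's own statement) =====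
-- stated objective: alternative
-- what changed: replaces the itertools.permutations call plus a second row-building loop (and the intermediate list of all permutations) with one recursive backtracking generator that picks remaining elements by index and emits each finished [first]+partial+[last] row directly
import Mathlib
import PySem

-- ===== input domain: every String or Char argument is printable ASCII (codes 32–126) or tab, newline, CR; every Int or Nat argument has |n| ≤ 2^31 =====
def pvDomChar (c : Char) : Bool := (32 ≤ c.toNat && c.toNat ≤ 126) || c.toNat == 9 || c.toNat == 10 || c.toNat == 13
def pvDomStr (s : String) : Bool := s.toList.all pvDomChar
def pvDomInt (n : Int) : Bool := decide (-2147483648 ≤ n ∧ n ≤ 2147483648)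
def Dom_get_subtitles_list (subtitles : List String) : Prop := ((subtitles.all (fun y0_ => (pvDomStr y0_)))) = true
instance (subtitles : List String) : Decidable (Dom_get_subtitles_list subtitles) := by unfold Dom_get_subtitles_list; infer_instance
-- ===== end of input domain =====

-- B changes the decomposition (one recursive backtracking generator emitting rows directly,
-- instead of itertools.permutations followed by a row-building loop); same cost, return value proved equal.

-- ===== PORT A =====
-- subtitles[0] / subtitles[-1] -> pyGet? (none = IndexError, excluded by Pre_);
-- subtitles[1:-1] -> slice; itertools.permutations(mid, len(mid)) -> PySem.List.permutations;
-- the two loops ([list(p) for p in …] and the append loop) -> map and foldl-append over the same rows.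
def get_subtitles_list (subtitles : List String) : List (List String) :=
  match PySem.List.pyGet? subtitles 0, PySem.List.pyGet? subtitles (-1) with
  | some first_paragraph, some last_paragraph =>
    let middle_paragraphs := PySem.List.slice subtitles (some 1) (some (-1))
    let permutations := PySem.List.permutations middle_paragraphs middle_paragraphs.length
    let permutations := permutations.map (fun p => p)
    permutations.foldl (fun text_list p => text_list ++ [first_paragraph :: (p ++ [last_paragraph])]) []
  | _, _ => []   -- unreachable under Pre_ (Python raises IndexError on [])

-- ===== PORT B =====
-- Source B's inner 'extend': 'remaining[:i] + remaining[i+1:]' for i < len is List.eraseIdx i,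
-- 'remaining[i]' is getD (i always in range); range(len(remaining)) -> List.range with attach for termination.
def pvExtend (first_paragraph last_paragraph : String) :
    List String → List String → List (List String)
  | [], partial_ => [first_paragraph :: (partial_ ++ [last_paragraph])]
  | r@(_ :: _), partial_ =>
    (List.range r.length).attach.flatMap (fun ⟨i, _⟩ =>
      pvExtend first_paragraph last_paragraph (r.eraseIdx i) (partial_ ++ [r.getD i ""]))
termination_by r _ => r.length
decreasing_by
  simp_all [List.length_eraseIdx, List.mem_range]

def get_subtitles_list_alt (subtitles : List String) : List (List String) :=
  match PySem.List.pyGet? subtitles 0 with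
  | none => []
  | some first_paragraph =>
    match PySem.List.pyGet? subtitles (-1) with
    | none => []
    | some last_paragraph =>
      let middle_paragraphs := PySem.List.slice subtitles (some 1) (some (-1))
      pvExtend first_paragraph last_paragraph middle_paragraphs []

-- ===== PRECONDITION & SPEC =====
-- Pre_ excludes only the empty list, on which subtitles[0] raises IndexError in both A and B.
def Pre_get_subtitles_list (subtitles : List String) : Prop := subtitles ≠ []
instance (subtitles : List String) : Decidable (Pre_get_subtitles_list subtitles) := by
  unfold Pre_get_subtitles_list; infer_instance

def pvWitness_get_subtitles_list : List String := ["a", "b", "c", "d"]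

def Spec_get_subtitles_list (subtitles : List String) (out : List (List String)) : Prop := out = get_subtitles_list_alt subtitles
instance (subtitles : List String) (out : List (List String)) : Decidable (Spec_get_subtitles_list subtitles out) := by unfold Spec_get_subtitles_list; infer_instance

-- ===== CLAIM (what is proved, stated in full; the proofs are below) =====
def Claim_equal_get_subtitles_list : Prop := ∀ (subtitles : List String), Dom_get_subtitles_list subtitles → Pre_get_subtitles_list subtitles → Spec_get_subtitles_list subtitles (get_subtitles_list subtitles)

-- ===== LEMMAS AND PROOFS =====

-- Invariant of B's backtracking generator: on remainder r with prefix `partial_`, it emits exactly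
-- the rows A builds from the permutations of r, with `partial_` spliced in front of each.
theorem pvExtend_eq (first_paragraph last_paragraph : String) :
    ∀ (r partial_ : List String),
      pvExtend first_paragraph last_paragraph r partial_ =
        (PySem.List.permutations r r.length).map
          (fun p => first_paragraph :: ((partial_ ++ p) ++ [last_paragraph])) := by
  intro r partial_
  induction r, partial_ using pvExtend.induct with
  | case1 partial_ => simp [pvExtend]
  | case2 x xs partial_ ih =>
    simp only [pvExtend, PySem.List.permutations, List.length_cons, List.map_flatMap]
    simp only [List.flatMap_subtype, List.unattach_attach]
    apply List.flatMap_congr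
    intro i hi
    have hlt : i < (x :: xs).length := by simpa using List.mem_range.mp hi
    rw [ih i hi]
    have : (x :: xs)[i]? = some ((x :: xs).getD i "") := by
      simp [List.getD, List.getElem?_eq_getElem hlt]
    rw [this]
    have hlen : ((x :: xs).eraseIdx i).length = xs.length := by
      have hlt' : i < xs.length + 1 := by simpa using hlt
      simp only [List.length_eraseIdx, List.length_cons, if_pos hlt', Nat.add_sub_cancel]
    rw [hlen]
    simp only [List.map_map, Function.comp_def]
    apply List.map_congr_left
    intro p _
    rw [← List.append_cons]

theorem get_subtitles_list_eq (subtitles : List String) :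
    get_subtitles_list subtitles = get_subtitles_list_alt subtitles := by
  unfold get_subtitles_list get_subtitles_list_alt
  cases h0 : PySem.List.pyGet? subtitles 0 with
  | none => simp
  | some f =>
    cases h1 : PySem.List.pyGet? subtitles (-1) with
    | none => simp
    | some l =>
      simp only [pvExtend_eq, List.map_id', List.nil_append]
      rw [PySem.List.foldl_append_singleton_eq_map]
      simp

-- ===== VERDICT (by name: the statement is the Claim_ definition above) =====
theorem get_subtitles_list_spec : Claim_equal_get_subtitles_list := by
  intro subtitles _ _
  exact get_subtitles_list_eq subtitles
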